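-- pv_equiv track=rewrite | github.com/darrenjedwards/spdp-observer-p-vs-np | spdp_exact.py | enumerate_shifts_boolean
-- ===== SOURCE A (Python) =====
-- import math, itertools
-- from typing import Dict, Tuple, Iterable, List
--
-- def enumerate_shifts_boolean(n: int, ell: int) -> List[int]:
--     out = [0]
--     for d in range(1, ell + 1):
--         for comb in itertools.combinations(range(n), d):
--             mask = 0
--             for i in comb:
--                 mask |= 1 << i
--             out.append(mask)
--     return out
-- ===== SOURCE B (Python) =====
-- def _dfs(n, start, rem, mask):
--     if rem == 0:
--         return [mask]
--     res = []
--     # last feasible first index is n - rem (enough indices must remain)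
--     for i in range(start, n - rem + 1):
--         res.extend(_dfs(n, i + 1, rem - 1, mask | (1 << i)))
--     return res
--
--
-- def enumerate_shifts_boolean(n: int, ell: int) -> list:
--     out = [0]
--     for d in range(1, ell + 1):
--         out.extend(_dfs(n, 0, d, 0))
--     return out
-- ===== Notes on version B (the rewrite author's own statement) =====
-- stated objective: alternative
-- what changed: Replaces the itertools.combinations enumeration, which re-folds each d-combination into a mask from scratch, by a recursive DFS over increasing bit indices that builds each mask incrementally and prunes index positions that cannot complete a combination, emitting the same masks in the same lex order.
import Mathlib
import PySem

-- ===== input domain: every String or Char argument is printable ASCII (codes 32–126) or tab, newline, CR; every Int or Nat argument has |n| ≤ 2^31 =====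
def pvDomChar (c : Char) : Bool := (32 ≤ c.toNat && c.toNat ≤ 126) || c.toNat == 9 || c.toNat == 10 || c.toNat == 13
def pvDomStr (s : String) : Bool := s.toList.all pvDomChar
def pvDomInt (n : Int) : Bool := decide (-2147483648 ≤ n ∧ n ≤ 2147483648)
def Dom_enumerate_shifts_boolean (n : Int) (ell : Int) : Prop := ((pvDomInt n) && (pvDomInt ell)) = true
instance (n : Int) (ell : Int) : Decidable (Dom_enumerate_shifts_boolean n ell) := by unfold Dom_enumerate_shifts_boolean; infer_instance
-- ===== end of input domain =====

-- ===== PORT A =====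
-- B replaces per-combination mask recomputation by an incremental pruned DFS; objective: alternative (same output, same order).

-- itertools.combinations(xs, d) in lexicographic order (A-side helper)
def pvCombs : Nat → List Int → List (List Int)
  | 0, _ => [[]]
  | _ + 1, [] => []
  | d + 1, x :: xs => (pvCombs d xs).map (fun c => x :: c) ++ pvCombs (d + 1) xs

-- mask | (1 << i): indices come from range(n), hence 0 ≤ i, where '1 << i' = 1 <<< i.toNat is exact
def pvStep (mask i : Int) : Int := PySem.Int.bor mask ((1 : Int) <<< i.toNat)

-- mask = 0; for i in comb: mask |= 1 << i
def pvMaskOf (comb : List Int) : Int := comb.foldl pvStep 0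

def enumerate_shifts_boolean (n : Int) (ell : Int) : List Int :=
  (PySem.List.pyRange 1 (ell + 1) 1).foldl
    (fun out d => out ++ (pvCombs d.toNat (PySem.List.pyRange 0 n 1)).map pvMaskOf)
    [0]

-- ===== PORT B =====
-- dfs(start, rem, mask): emits mask when rem == 0, else recurses over i in range(start, n - rem + 1)
def pvDfs (n : Int) (start : Int) (rem : Nat) (mask : Int) : List Int :=
  match rem with
  | 0 => [mask]
  | r + 1 =>
    (PySem.List.pyRange start (n - r) 1).flatMap (fun i => pvDfs n (i + 1) r (pvStep mask i))

def enumerate_shifts_boolean_alt (n : Int) (ell : Int) : List Int :=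
  0 :: (PySem.List.pyRange 1 (ell + 1) 1).flatMap (fun d => pvDfs n 0 d.toNat 0)

-- ===== PRECONDITION & SPEC =====
def Spec_enumerate_shifts_boolean (n : Int) (ell : Int) (out : List Int) : Prop := out = enumerate_shifts_boolean_alt n ell
instance (n : Int) (ell : Int) (out : List Int) : Decidable (Spec_enumerate_shifts_boolean n ell out) := by unfold Spec_enumerate_shifts_boolean; infer_instance

-- ===== CLAIM (what is proved, stated in full; the proofs are below) =====
def Claim_equal_enumerate_shifts_boolean : Prop := ∀ (n : Int) (ell : Int), Dom_enumerate_shifts_boolean n ell → Spec_enumerate_shifts_boolean n ell (enumerate_shifts_boolean n ell)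

-- ===== LEMMAS AND PROOFS =====

-- combinations of fewer than d elements: none
theorem pvCombs_eq_nil : ∀ (xs : List Int) (d : Nat), xs.length < d → pvCombs d xs = [] := by
  intro xs
  induction xs with
  | nil => intro d hd; match d, hd with | e + 1, _ => rfl
  | cons x xs ih =>
    intro d hd
    match d, hd with
    | e + 1, hd =>
      simp only [pvCombs]
      have h1 : xs.length < e := by simpa using hd
      rw [ih e h1, ih (e + 1) (by omega)]
      rfl

-- DFS with accumulator mask = fold of the step function over each combination of the remaining range
theorem pvDfs_eq (n : Int) : ∀ (r : Nat) (start mask : Int),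
    pvDfs n start r mask =
      (pvCombs r (PySem.List.pyRange start n 1)).map (fun c => c.foldl pvStep mask) := by
  intro r
  induction r with
  | zero => intro start mask; simp [pvDfs, pvCombs]
  | succ r ih =>
    intro start mask
    have key : ∀ (k : Nat) (start mask : Int), (n - r - start).toNat = k →
        pvDfs n start (r + 1) mask =
          (pvCombs (r + 1) (PySem.List.pyRange start n 1)).map (fun c => c.foldl pvStep mask) := by
      intro k
      induction k with
      | zero =>
        intro start mask hk
        have hba : n - r ≤ start := by omega
        have hlen : (PySem.List.pyRange start n 1).length < r + 1 := by
          rw [PySem.List.length_pyRange_one]; omega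
        rw [pvCombs_eq_nil _ _ hlen]
        simp [pvDfs, PySem.List.pyRange_one_eq_nil hba]
      | succ k ihk =>
        intro start mask hk
        have hlt : start < n - r := by omega
        have hltn : start < n := by omega
        rw [show pvDfs n start (r + 1) mask =
            (PySem.List.pyRange start (n - r) 1).flatMap
              (fun i => pvDfs n (i + 1) r (pvStep mask i)) from rfl]
        rw [PySem.List.pyRange_one_cons hlt]
        have hrec : (PySem.List.pyRange (start + 1) (n - r) 1).flatMap
            (fun i => pvDfs n (i + 1) r (pvStep mask i))
            = pvDfs n (start + 1) (r + 1) mask := rfl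
        rw [List.flatMap_cons, hrec, ihk (start + 1) mask (by omega), ih,
          PySem.List.pyRange_one_cons hltn]
        simp only [pvCombs, List.map_append, List.map_map, Function.comp_def, List.foldl_cons]
    exact key (n - r - start).toNat start mask rfl

-- ===== VERDICT (by name: the statement is the Claim_ definition above) =====
theorem enumerate_shifts_boolean_spec : Claim_equal_enumerate_shifts_boolean := by
  intro n ell _
  unfold Spec_enumerate_shifts_boolean enumerate_shifts_boolean enumerate_shifts_boolean_alt
  rw [PySem.List.foldl_append_eq_flatMap]
  simp only [List.singleton_append]
  congr 1
  apply List.flatMap_congr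
  intro d _
  rw [pvDfs_eq]
  rfl
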